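-- pv_equiv track=rewrite | github.com/daandeey/Vignere-Cipher-Video-Steganography | cipher/cipher.py | PlaintextToBigraf
-- ===== SOURCE A (Python) =====
-- def PlaintextToBigraf(p):
--     p = p.replace(" ","")
--     p = list(p)
--
--     i = 0
--     #if both letters are same, add 'x'
--     while i < len(p) - 1:
--         if p[i] == p[i + 1]:
--             p.insert(i + 1, 'x')
--         i += 2
--
--     #if the length is odd, add 'x' at the end
--     if len(p) % 2 != 0:
--         p.append('x')
--
--     bigraf = [p[i:i+2] for i in range(0, len(p), 2)]
--
--     return bigraf
-- ===== SOURCE B (Python) =====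
-- def PlaintextToBigraf(p):
--     bigraf = []
--     pending = None
--     for c in p.replace(" ", ""):
--         if pending is None:
--             pending = c
--         elif pending == c:
--             bigraf.append([pending, 'x'])
--             pending = c
--         else:
--             bigraf.append([pending, c])
--             pending = None
--     if pending is not None:
--         bigraf.append([pending, 'x'])
--     return bigraf
-- ===== Notes on version B (the rewrite author's own statement) =====
-- stated objective: faster
-- what changed: Replaces A's two-phase design (inserting pad letters into a mutated flat list via index arithmetic with O(n) list.insert calls, then re-chunking it with slices over a step-2 range) by a single linear pass keeping one pending character and emitting each completed bigram directly.
import Mathlib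
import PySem

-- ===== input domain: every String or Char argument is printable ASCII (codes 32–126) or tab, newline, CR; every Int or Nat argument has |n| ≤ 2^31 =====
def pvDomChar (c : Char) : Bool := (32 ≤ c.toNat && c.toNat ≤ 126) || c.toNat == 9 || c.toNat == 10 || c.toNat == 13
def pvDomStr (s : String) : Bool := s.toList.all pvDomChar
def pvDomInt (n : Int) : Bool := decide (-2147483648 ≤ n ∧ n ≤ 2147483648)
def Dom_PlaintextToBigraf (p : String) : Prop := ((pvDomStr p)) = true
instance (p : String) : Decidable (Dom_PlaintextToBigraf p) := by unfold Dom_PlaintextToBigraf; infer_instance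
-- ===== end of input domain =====

-- B replaces A's quadratic insert-then-chunk design by a single linear pass keeping one
-- pending character (objective: faster, measured); return values proved equal on all inputs.

-- ===== PORT A =====
-- the while loop: state is the mutated list p and the index i; fuel only bounds the
-- iteration count (the loop runs at most (initial length) times), it never changes the result
def pvLoopA (fuel : Nat) (p : List String) (i : Nat) : List String :=
  match fuel with
  | 0 => p
  | fuel + 1 =>
    if i < p.length - 1 then
      if PySem.List.pyGet? p (i : Int) = PySem.List.pyGet? p ((i : Int) + 1) then
        pvLoopA fuel (PySem.List.insert p ((i : Int) + 1) "x") (i + 2)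
      else
        pvLoopA fuel p (i + 2)
    else p

def PlaintextToBigraf (p : String) : List (List String) :=
  let p1 := PySem.Str.replace p " " ""          -- p = p.replace(" ","")
  let l0 := p1.toList.map (fun c => c.toString) -- p = list(p)
  let l1 := pvLoopA l0.length l0 0                        -- the while loop
  let l2 := if l1.length % 2 ≠ 0 then l1 ++ ["x"] else l1   -- odd length: append 'x'
  (PySem.List.pyRange 0 (l2.length : Int) 2).map
    (fun i => PySem.List.slice l2 (some i) (some (i + 2)))  -- [p[i:i+2] for i in range(0,len(p),2)]

-- ===== PORT B =====
-- loop body of B: state is (bigraf so far, pending character)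
def pvStepB (s : List (List String) × Option String) (c : String) :
    List (List String) × Option String :=
  match s.2 with
  | none => (s.1, some c)
  | some a => if a = c then (s.1 ++ [[a, "x"]], some c) else (s.1 ++ [[a, c]], none)

def PlaintextToBigraf_alt (p : String) : List (List String) :=
  let cs := (PySem.Str.replace p " " "").toList.map (fun c => c.toString)
  let s := cs.foldl pvStepB ([], none)
  match s.2 with
  | none => s.1
  | some a => s.1 ++ [[a, "x"]]

-- ===== PRECONDITION & SPEC =====
def Spec_PlaintextToBigraf (p : String) (out : List (List String)) : Prop := out = PlaintextToBigraf_alt p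
instance (p : String) (out : List (List String)) : Decidable (Spec_PlaintextToBigraf p out) := by unfold Spec_PlaintextToBigraf; infer_instance

-- ===== CLAIM (what is proved, stated in full; the proofs are below) =====
def Claim_equal_PlaintextToBigraf : Prop := ∀ (p : String), Dom_PlaintextToBigraf p → Spec_PlaintextToBigraf p (PlaintextToBigraf p)

-- ===== LEMMAS AND PROOFS =====

-- the normalised letter list: duplicates inside a pair separated by "x"
def pvNorm : List String → List String
  | a :: b :: r => if a = b then a :: "x" :: pvNorm (b :: r) else a :: b :: pvNorm r
  | l => l

-- the reference bigram list, built structurally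
def pvBig : List String → List (List String)
  | [] => []
  | [a] => [[a, "x"]]
  | a :: b :: r => if a = b then [a, "x"] :: pvBig (b :: r) else [a, b] :: pvBig r

def pvPad (l : List String) : List String :=
  if l.length % 2 ≠ 0 then l ++ ["x"] else l

def pvChunk2 : List String → List (List String)
  | [] => []
  | [a] => [[a]]
  | a :: b :: r => [a, b] :: pvChunk2 r

def pvFinishB (s : List (List String) × Option String) : List (List String) :=
  match s.2 with
  | none => s.1
  | some a => s.1 ++ [[a, "x"]]

lemma pvFoldB (l : List String) :
    ∀ (acc : List (List String)) (po : Option String),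
      pvFinishB (l.foldl pvStepB (acc, po)) =
        acc ++ pvBig (match po with | none => l | some a => a :: l) := by
  induction l with
  | nil =>
      intro acc po
      cases po with
      | none => simp [pvFinishB, pvBig]
      | some a => simp [pvFinishB, pvBig]
  | cons c r ih =>
      intro acc po
      cases po with
      | none =>
          simpa [pvStepB] using ih acc (some c)
      | some a =>
          by_cases hac : a = c
          · simp only [List.foldl_cons, pvStepB]
            rw [if_pos hac, hac, ih (acc ++ [[c, "x"]]) (some c)]
            simp [pvBig]
          · simp only [List.foldl_cons, pvStepB]
            rw [if_neg hac, ih (acc ++ [[a, c]]) none]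
            simp [pvBig, hac]

lemma pvInsertMid (pre t : List String) (a x : String) :
    PySem.List.insert (pre ++ a :: t) ((pre.length : Int) + 1) x = pre ++ a :: x :: t := by
  have h : ((pre.length : Int) + 1) = ((pre.length + 1 : Nat) : Int) := by push_cast; ring
  rw [h, PySem.List.insert_natCast _ _ _ (by simp)]
  induction pre with
  | nil => simp
  | cons y ys ih => simpa using ih (by push_cast; ring)

lemma pvLoopA_norm (rest : List String) : ∀ (pre : List String) (f : Nat),
    rest.length ≤ f → pvLoopA f (pre ++ rest) pre.length = pre ++ pvNorm rest := by
  induction rest using pvNorm.induct with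
  | case1 b r ih =>
      intro pre f hf
      obtain ⟨f, rfl⟩ : ∃ f', f = f' + 1 := ⟨f - 1, by simp at hf; omega⟩
      rw [pvLoopA]
      have hlt : pre.length < (pre ++ b :: b :: r).length - 1 := by simp
      rw [if_pos hlt]
      have h1 : PySem.List.pyGet? (pre ++ b :: b :: r) (pre.length : Int) = some b :=
        PySem.List.pyGet?_append_length pre _ b
      have h2 : PySem.List.pyGet? (pre ++ b :: b :: r) ((pre.length : Int) + 1) = some b := by
        have := PySem.List.pyGet?_append_right pre (b :: b :: r) 1
        simpa using this
      rw [h1, h2, if_pos rfl, pvInsertMid]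
      have hre : pre ++ b :: "x" :: b :: r = (pre ++ [b, "x"]) ++ (b :: r) := by simp
      have hlen : pre.length + 2 = (pre ++ [b, "x"]).length := by simp
      rw [hre, hlen, ih (pre ++ [b, "x"]) f (by simp at hf ⊢; omega)]
      simp [pvNorm]
  | case2 a b r hab ih =>
      intro pre f hf
      obtain ⟨f, rfl⟩ : ∃ f', f = f' + 1 := ⟨f - 1, by simp at hf; omega⟩
      rw [pvLoopA]
      have hlt : pre.length < (pre ++ a :: b :: r).length - 1 := by simp
      rw [if_pos hlt]
      have h1 : PySem.List.pyGet? (pre ++ a :: b :: r) (pre.length : Int) = some a :=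
        PySem.List.pyGet?_append_length pre _ a
      have h2 : PySem.List.pyGet? (pre ++ a :: b :: r) ((pre.length : Int) + 1) = some b := by
        have := PySem.List.pyGet?_append_right pre (a :: b :: r) 1
        simpa using this
      rw [h1, h2, if_neg (by simp [hab])]
      have hre : pre ++ a :: b :: r = (pre ++ [a, b]) ++ r := by simp
      have hlen : pre.length + 2 = (pre ++ [a, b]).length := by simp
      rw [hre, hlen, ih (pre ++ [a, b]) f (by simp at hf ⊢; omega)]
      simp [pvNorm, hab]
  | case3 l h =>
      intro pre f _
      match l, h with
      | [], _ =>
          cases f with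
          | zero => simp [pvLoopA, pvNorm]
          | succ f =>
              rw [pvLoopA]
              rw [if_neg (by simp)]
              simp [pvNorm]
      | [a], _ =>
          cases f with
          | zero => simp [pvLoopA, pvNorm]
          | succ f =>
              rw [pvLoopA]
              rw [if_neg (by simp)]
              simp [pvNorm]
      | a :: b :: r, h => exact (h a b r rfl).elim

lemma pvSlice2 (l : List String) (k : Nat) :
    PySem.List.slice l (some (0 + 2 * (k : Int))) (some (0 + 2 * (k : Int) + 2))
      = (l.drop (2 * k)).take 2 := by
  rw [PySem.List.slice_toNat _ (by positivity) (by positivity)]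
  have h1 : ((0:Int) + 2 * (k:Int)).toNat = 2 * k := by omega
  have h2 : ((0:Int) + 2 * (k:Int) + 2).toNat = 2 * k + 2 := by omega
  rw [h1, h2]
  have h3 : 2 * k + 2 - 2 * k = 2 := by omega
  rw [h3]

lemma pvCnt (n : Nat) :
    (if (0:Int) < (n:Int) then (((n:Int) - 0 + 2 - 1) / 2).toNat else 0) = (n + 1) / 2 := by
  split_ifs with h <;> omega

lemma pvChunkT (l : List String) :
    (List.range ((l.length + 1) / 2)).map (fun k => (l.drop (2 * k)).take 2) = pvChunk2 l := by
  induction l using pvChunk2.induct with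
  | case1 => simp [pvChunk2]
  | case2 a => simp [pvChunk2]
  | case3 a b r ih =>
      have hc : ((a :: b :: r).length + 1) / 2 = (r.length + 1) / 2 + 1 := by simp; omega
      rw [hc, List.range_succ_eq_map, List.map_cons, List.map_map, pvChunk2]
      refine congrArg₂ List.cons (by simp) ?_
      rw [← ih]
      refine List.map_congr_left (fun k _ => ?_)
      show (List.drop (2 * Nat.succ k) (a :: b :: r)).take 2 = (List.drop (2 * k) r).take 2
      have h : 2 * Nat.succ k = 2 * k + 1 + 1 := by omega
      rw [h, List.drop_succ_cons, List.drop_succ_cons]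

lemma pvChunkA_eq (l : List String) :
    (PySem.List.pyRange 0 (l.length : Int) 2).map
      (fun i => PySem.List.slice l (some i) (some (i + 2))) = pvChunk2 l := by
  rw [PySem.List.pyRange_of_pos _ _ (by norm_num)]
  rw [List.map_map]
  have h : ((fun i => PySem.List.slice l (some i) (some (i + 2))) ∘ (fun k : Nat => (0:Int) + 2 * ↑k))
      = fun k : Nat => (l.drop (2 * k)).take 2 := by
    funext k
    exact pvSlice2 l k
  rw [h, pvCnt, pvChunkT]

lemma pvPad_cons2 (x y : String) (t : List String) : pvPad (x :: y :: t) = x :: y :: pvPad t := by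
  have h : (t.length + 1 + 1) % 2 = t.length % 2 := by omega
  simp only [pvPad, List.length_cons, h]
  split_ifs <;> simp

lemma pvChunkPadNorm (l : List String) : pvChunk2 (pvPad (pvNorm l)) = pvBig l := by
  induction l using pvNorm.induct with
  | case1 b r ih =>
      rw [pvNorm, if_pos rfl, pvPad_cons2, pvChunk2, ih, pvBig, if_pos rfl]
  | case2 a b r hab ih =>
      rw [pvNorm, if_neg hab, pvPad_cons2, pvChunk2, ih, pvBig, if_neg hab]
  | case3 l h =>
      match l, h with
      | [], _ => simp [pvNorm, pvPad, pvChunk2, pvBig]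
      | [a], _ => simp [pvNorm, pvPad, pvChunk2, pvBig]
      | a :: b :: r, h => exact (h a b r rfl).elim

-- ===== VERDICT (by name: the statement is the Claim_ definition above) =====
theorem PlaintextToBigraf_spec : Claim_equal_PlaintextToBigraf := by
  intro p _
  unfold Spec_PlaintextToBigraf PlaintextToBigraf PlaintextToBigraf_alt
  simp only []
  set l0 := (PySem.Str.replace p " " "").toList.map (fun c => c.toString) with hl0
  have hA : pvLoopA l0.length l0 0 = pvNorm l0 := by
    have := pvLoopA_norm l0 [] l0.length le_rfl
    simpa using this
  have hpad : (if (pvLoopA l0.length l0 0).length % 2 ≠ 0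
        then pvLoopA l0.length l0 0 ++ ["x"] else pvLoopA l0.length l0 0)
      = pvPad (pvNorm l0) := by rw [hA]; rfl
  rw [hpad, pvChunkA_eq, pvChunkPadNorm]
  have := pvFoldB l0 [] none
  simpa [pvFinishB] using this.symm
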